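-- pv_equiv track=rewrite | github.com/shira-g/openvino.genai | tools/llm_bench/llm_bench_utils/model_utils.py | get_model_precision
-- ===== SOURCE A (Python) =====
-- def get_model_precision(model_name_list):
--     precision_list = [
--         'FP32', 'FP16',
--         'FP16-INT8', 'INT8', 'INT8_compressed_weights', 'INT8_quantized', 'PT_compressed_weights',
--         'OV_FP32-INT8', 'OV_FP16-INT8',
--         'OV_FP32-INT8_ASYM', 'OV_FP32-INT8_SYM', 'OV_FP16-INT8_ASYM', 'OV_FP16-INT8_SYM',
--         'PT_FP32-INT8', 'PT_FP16-INT8', 'PT_FP32-INT8_ASYM', 'PT_FP32-INT8_SYM', 'PT_FP16-INT8_ASYM', 'PT_FP16-INT8_SYM',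
--         'GPTQ_INT4-FP32', 'GPTQ_INT4-FP16', 'INT4',
--         'OV_FP16-INT4_SYM', 'OV_FP16-INT4_ASYM', 'OV_FP32-INT4_SYM', 'OV_FP32-INT4_ASYM',
--         'OV_FP32-4BIT_DEFAULT', 'OV_FP16-4BIT_DEFAULT', 'OV_FP32-4BIT_MAXIMUM', 'OV_FP16-4BIT_MAXIMUM']
--     model_precision = 'unknown'
--     # Search from right to left of model path
--     for i in range(len(model_name_list) - 1, -1, -1):
--         for precision in precision_list:
--             if model_name_list[i] == precision:
--                 model_precision = precision
--                 break
--         if model_precision != 'unknown':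
--             break
--     return model_precision
-- ===== SOURCE B (Python) =====
-- def get_model_precision(model_name_list):
--     precision_set = {
--         'FP32', 'FP16',
--         'FP16-INT8', 'INT8', 'INT8_compressed_weights', 'INT8_quantized', 'PT_compressed_weights',
--         'OV_FP32-INT8', 'OV_FP16-INT8',
--         'OV_FP32-INT8_ASYM', 'OV_FP32-INT8_SYM', 'OV_FP16-INT8_ASYM', 'OV_FP16-INT8_SYM',
--         'PT_FP32-INT8', 'PT_FP16-INT8', 'PT_FP32-INT8_ASYM', 'PT_FP32-INT8_SYM', 'PT_FP16-INT8_ASYM', 'PT_FP16-INT8_SYM',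
--         'GPTQ_INT4-FP32', 'GPTQ_INT4-FP16', 'INT4',
--         'OV_FP16-INT4_SYM', 'OV_FP16-INT4_ASYM', 'OV_FP32-INT4_SYM', 'OV_FP32-INT4_ASYM',
--         'OV_FP32-4BIT_DEFAULT', 'OV_FP16-4BIT_DEFAULT', 'OV_FP32-4BIT_MAXIMUM', 'OV_FP16-4BIT_MAXIMUM'}
--     model_precision = 'unknown'
--     # Single forward pass keeping the LAST match == rightmost match
--     for part in model_name_list:
--         if part in precision_set:
--             model_precision = part
--     return model_precision
-- ===== Notes on version B (the rewrite author's own statement) =====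
-- stated objective: simpler
-- what changed: Replaces A's reverse index loop with nested linear scan over the precision list and double break by a single forward pass that keeps the last element found in a precision set.
import Mathlib
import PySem

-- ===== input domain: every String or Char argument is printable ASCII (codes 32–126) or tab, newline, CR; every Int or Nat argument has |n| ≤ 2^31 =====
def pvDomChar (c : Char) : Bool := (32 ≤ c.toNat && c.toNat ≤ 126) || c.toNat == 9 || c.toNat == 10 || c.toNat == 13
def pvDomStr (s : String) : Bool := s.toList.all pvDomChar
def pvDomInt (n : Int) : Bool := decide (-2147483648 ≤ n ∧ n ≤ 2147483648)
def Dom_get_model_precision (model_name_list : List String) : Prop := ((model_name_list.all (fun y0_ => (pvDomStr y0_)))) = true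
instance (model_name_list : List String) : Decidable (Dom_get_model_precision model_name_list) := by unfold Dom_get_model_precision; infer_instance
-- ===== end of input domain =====

-- B replaces A's reverse index loop (nested scan over the precision list, double break)
-- by a single forward pass keeping the last element found in a precision set (objective: simpler).

-- ===== PORT A =====
def pvPrecisionList : List String :=
  ["FP32", "FP16",
   "FP16-INT8", "INT8", "INT8_compressed_weights", "INT8_quantized", "PT_compressed_weights",
   "OV_FP32-INT8", "OV_FP16-INT8",
   "OV_FP32-INT8_ASYM", "OV_FP32-INT8_SYM", "OV_FP16-INT8_ASYM", "OV_FP16-INT8_SYM",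
   "PT_FP32-INT8", "PT_FP16-INT8", "PT_FP32-INT8_ASYM", "PT_FP32-INT8_SYM", "PT_FP16-INT8_ASYM", "PT_FP16-INT8_SYM",
   "GPTQ_INT4-FP32", "GPTQ_INT4-FP16", "INT4",
   "OV_FP16-INT4_SYM", "OV_FP16-INT4_ASYM", "OV_FP32-INT4_SYM", "OV_FP32-INT4_ASYM",
   "OV_FP32-4BIT_DEFAULT", "OV_FP16-4BIT_DEFAULT", "OV_FP32-4BIT_MAXIMUM", "OV_FP16-4BIT_MAXIMUM"]

-- A's inner 'for precision in precision_list: … break': first match wins, else mp unchanged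
def pvInnerA (x : String) (mp : String) : List String → String
  | [] => mp
  | p :: ps => if x = p then p else pvInnerA x mp ps

-- A's outer 'for i in range(len-1, -1, -1)' with the 'if model_precision != unknown: break'
def pvOuterA (xs : List String) (mp : String) : List Int → String
  | [] => mp
  | i :: rest =>
    let mp' := pvInnerA (PySem.List.pyGetD xs i "") mp pvPrecisionList  -- index i is always in range here
    if mp' ≠ "unknown" then mp' else pvOuterA xs mp' rest

def get_model_precision (model_name_list : List String) : String :=
  pvOuterA model_name_list "unknown"
    (PySem.List.pyRange ((model_name_list.length : Int) - 1) (-1) (-1))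

-- ===== PORT B =====
-- 'part in precision_set': boolean membership test in the (duplicate-free) label collection.
-- (Ported as a direct membership scan with propositional String equality: Python-exact here,
-- and kernel-evaluable — BEq-String set operations do not reduce in reasonable time.)
def pvMember (x : String) : List String → Bool
  | [] => false
  | p :: ps => if x = p then true else pvMember x ps

def get_model_precision_alt (model_name_list : List String) : String :=
  model_name_list.foldl (fun mp part => if pvMember part pvPrecisionList then part else mp) "unknown"

-- ===== PRECONDITION & SPEC =====
def Spec_get_model_precision (model_name_list : List String) (out : String) : Prop := out = get_model_precision_alt model_name_list
instance (model_name_list : List String) (out : String) : Decidable (Spec_get_model_precision model_name_list out) := by unfold Spec_get_model_precision; infer_instance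

-- ===== CLAIM (what is proved, stated in full; the proofs are below) =====
def Claim_equal_get_model_precision : Prop := ∀ (model_name_list : List String), Dom_get_model_precision model_name_list → Spec_get_model_precision model_name_list (get_model_precision model_name_list)

-- ===== LEMMAS AND PROOFS =====

-- common characterisation: first match scanning a list, default "unknown"
def pvFirstC (mp : String) : List String → String
  | [] => mp
  | x :: r => if pvMember x pvPrecisionList then x else pvFirstC mp r

theorem pvInnerA_eq (x mp : String) (l : List String) :
    pvInnerA x mp l = if pvMember x l then x else mp := by
  induction l with
  | nil => simp [pvInnerA, pvMember]
  | cons p ps ih =>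
    by_cases h : x = p
    · subst h; simp [pvInnerA, pvMember]
    · simp [pvInnerA, pvMember, h, ih]

theorem pv_mem_ne_unknown (x : String) (h : pvMember x pvPrecisionList = true) :
    x ≠ "unknown" := by
  intro hx; subst hx; revert h; decide

theorem pvOuterA_eq (xs : List String) (is : List Int) :
    pvOuterA xs "unknown" is
      = pvFirstC "unknown" (is.map (fun i => PySem.List.pyGetD xs i "")) := by
  induction is with
  | nil => simp [pvOuterA, pvFirstC]
  | cons i rest ih =>
    simp only [pvOuterA, pvInnerA_eq, List.map_cons, pvFirstC]
    by_cases h : pvMember (PySem.List.pyGetD xs i "") pvPrecisionList = true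
    · simp [h, pv_mem_ne_unknown _ h]
    · simp [h, ih]

theorem pvFirstC_append_singleton (l : List String) (x : String) (mp : String) :
    pvFirstC mp (l ++ [x]) = pvFirstC (if pvMember x pvPrecisionList then x else mp) l := by
  induction l with
  | nil => simp [pvFirstC]
  | cons y r ih => simp [pvFirstC, ih]

theorem pvFoldl_eq_firstC_reverse (xs : List String) (mp : String) :
    xs.foldl (fun mp part => if pvMember part pvPrecisionList then part else mp) mp
      = pvFirstC mp xs.reverse := by
  induction xs generalizing mp with
  | nil => simp [pvFirstC]
  | cons x r ih => rw [List.foldl_cons, ih, List.reverse_cons, pvFirstC_append_singleton]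

-- ===== VERDICT (by name: the statement is the Claim_ definition above) =====
theorem get_model_precision_spec : Claim_equal_get_model_precision := by
  intro xs _
  unfold Spec_get_model_precision get_model_precision get_model_precision_alt
  simp only [pvFoldl_eq_firstC_reverse, pvOuterA_eq]
  have h1 : PySem.List.pyRange ((xs.length : Int) - 1) (-1) (-1)
      = (PySem.List.pyRange 0 (xs.length : Int) 1).reverse := by
    rw [PySem.List.pyRange_neg_one_eq_reverse]; norm_num
  rw [h1, List.map_reverse, PySem.List.map_pyGetD_pyRange_zero' xs ""]
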